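-- pv_equiv track=rewrite | github.com/fanboybp/Khai_Ngu | bai10.py | soluongphantudandau
-- ===== SOURCE A (Python) =====
-- def soluongphantudandau(lst):
--     max_count = 0  # Số lượng các phần tử liên tiếp đan dấu nhiều nhất
--     current_count = 0  # Số lượng hiện tại của các phần tử liên tiếp đan dấu
--
--     for i in range(len(lst) - 1):
--         if lst[i] * lst[i + 1] < 0:
--             current_count += 1
--             max_count = max(max_count, current_count)
--         else:
--             current_count = 0
--
--     return max_count
-- ===== SOURCE B (Python) =====
-- def soluongphantudandau(lst):
--     # Build the table of adjacent alternating-sign flags, then scan it for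
--     # the longest run of True using a two-pointer run scan.
--     flags = [a * b < 0 for a, b in zip(lst, lst[1:])]
--     best = 0
--     i = 0
--     n = len(flags)
--     while i < n:
--         if flags[i]:
--             j = i + 1
--             while j < n and flags[j]:
--                 j += 1
--             best = max(best, j - i)
--             i = j
--         else:
--             i += 1
--     return best
-- ===== Notes on version B (the rewrite author's own statement) =====
-- stated objective: alternative
-- what changed: Replaces A's single loop with an inline running-counter/max update by a two-phase decomposition: first build the table of pairwise alternating-sign flags (zip of adjacent pairs), then find the longest run of consecutive True flags with a two-pointer run scan.
import Mathlib
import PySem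

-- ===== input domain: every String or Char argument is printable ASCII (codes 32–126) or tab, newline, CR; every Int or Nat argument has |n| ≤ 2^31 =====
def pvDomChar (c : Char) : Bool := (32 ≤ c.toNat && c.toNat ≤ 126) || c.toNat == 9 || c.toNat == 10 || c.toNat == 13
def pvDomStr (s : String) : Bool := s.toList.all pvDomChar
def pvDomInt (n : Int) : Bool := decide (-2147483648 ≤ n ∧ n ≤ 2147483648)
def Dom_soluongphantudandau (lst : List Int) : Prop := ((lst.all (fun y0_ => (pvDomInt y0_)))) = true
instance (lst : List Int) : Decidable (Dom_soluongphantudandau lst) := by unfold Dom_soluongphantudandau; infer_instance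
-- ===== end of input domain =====

-- B replaces A's inline running-counter/max loop by a pairwise-flags table plus a
-- two-pointer longest-True-run scan (alternative decomposition, same O(n) cost).

-- ===== PORT A =====
-- for i in range(len(lst)-1): if lst[i]*lst[i+1] < 0: current+=1; max=max(max,current) else: current=0
def soluongphantudandau (lst : List Int) : Int :=
  (PySem.List.pyRange 0 ((lst.length : Int) - 1) 1).foldl
    (fun (st : Int × Int) i =>
      if PySem.List.pyGetD lst i 0 * PySem.List.pyGetD lst (i + 1) 0 < 0 then
        (max st.1 (st.2 + 1), st.2 + 1)
      else (st.1, 0)) (0, 0) |>.1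

-- ===== PORT B =====
-- flags = [a*b < 0 for a, b in zip(lst, lst[1:])]   (lst[1:] is exactly lst.drop 1)
def pvFlags (lst : List Int) : List Bool :=
  (lst.zip (lst.drop 1)).map (fun p => decide (p.1 * p.2 < 0))

-- the two-pointer while loop over flags: on a True at i, the inner while (= span)
-- consumes the whole run [i, j); best = max(best, j-i); continue at j; on False skip.
def pvScan (fs : List Bool) (best : Int) : Int :=
  match fs with
  | [] => best
  | true :: t =>
      let s := t.span (fun b => b)
      pvScan s.2 (max best ((s.1.length : Int) + 1))
  | false :: t => pvScan t best
termination_by fs.length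
decreasing_by
  · simp only [List.span_eq_takeWhile_dropWhile]
    have := List.length_dropWhile_le (p := fun b => b) (l := t)
    simp; omega
  · simp

def soluongphantudandau_alt (lst : List Int) : Int :=
  pvScan (pvFlags lst) 0

-- ===== PRECONDITION & SPEC =====
def Spec_soluongphantudandau (lst : List Int) (out : Int) : Prop := out = soluongphantudandau_alt lst
instance (lst : List Int) (out : Int) : Decidable (Spec_soluongphantudandau lst out) := by unfold Spec_soluongphantudandau; infer_instance

-- ===== CLAIM (what is proved, stated in full; the proofs are below) =====
def Claim_equal_soluongphantudandau : Prop := ∀ (lst : List Int), Dom_soluongphantudandau lst → Spec_soluongphantudandau lst (soluongphantudandau lst)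

-- ===== LEMMAS AND PROOFS =====

-- A's loop body as a step on (max_count, current_count)
def pvStep (st : Int × Int) (b : Bool) : Int × Int :=
  if b then (max st.1 (st.2 + 1), st.2 + 1) else (st.1, 0)

lemma pv_dropWhile_head_false : ∀ (t : List Bool) (b : Bool) (r : List Bool),
    t.dropWhile (fun x => x) = b :: r → b = false := by
  intro t
  induction t with
  | nil => intro b r h; simp [List.dropWhile] at h
  | cons a t ih =>
    intro b r h
    cases a with
    | true => exact ih b r (by simpa [List.dropWhile] using h)
    | false => simp [List.dropWhile] at h; exact h.1

-- a block of Trues pushes current to c+|u| and max to max m (c+|u|), given c ≤ m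
lemma pv_aux_run : ∀ (u rest : List Bool) (m c : Int), (∀ b ∈ u, b = true) → c ≤ m →
    (u ++ rest).foldl pvStep (m, c) = rest.foldl pvStep (max m (c + u.length), c + u.length) := by
  intro u
  induction u with
  | nil =>
    intro rest m c _ hcm
    simp [max_eq_left hcm]
  | cons a u ih =>
    intro rest m c hall hcm
    have ha : a = true := hall a (by simp)
    subst ha
    have h1 : (true :: u ++ rest).foldl pvStep (m, c) = (u ++ rest).foldl pvStep (max m (c + 1), c + 1) := by
      simp [pvStep]
    rw [h1, ih rest (max m (c + 1)) (c + 1) (fun b hb => hall b (by simp [hb])) (le_max_right _ _)]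
    simp only [List.length_cons]
    push_cast
    have hmx : max (max m (c + 1)) (c + 1 + (u.length : Int)) = max m (c + ((u.length : Int) + 1)) := by
      rw [max_assoc, max_eq_right (by omega : (c : Int) + 1 ≤ c + 1 + (u.length : Int))]
      congr 1
      ring
    have hc : c + 1 + (u.length : Int) = c + ((u.length : Int) + 1) := by ring
    rw [hmx, hc]

lemma pv_scan_eq : ∀ (n : Nat) (fs : List Bool) (m : Int), fs.length ≤ n →
    (fs.foldl pvStep (m, 0)).1 = pvScan fs m := by
  intro n
  induction n with
  | zero =>
    intro fs m h
    have : fs = [] := List.eq_nil_of_length_eq_zero (Nat.le_zero.mp h)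
    subst this; simp [pvScan]
  | succ n ih =>
    intro fs m h
    match fs with
    | [] => simp [pvScan]
    | false :: t =>
      have h1 : ((false :: t).foldl pvStep (m, 0)) = t.foldl pvStep (m, 0) := by simp [pvStep]
      rw [h1, ih t m (by simpa using Nat.lt_succ_iff.mp (Nat.lt_of_lt_of_le (by simp) h))]
      simp [pvScan]
    | true :: t =>
      have ht : t.length ≤ n := by simpa using h
      have hsplit : t = t.takeWhile (fun b => b) ++ t.dropWhile (fun b => b) :=
        (List.takeWhile_append_dropWhile).symm
      have hall : ∀ b ∈ t.takeWhile (fun b => b), b = true := by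
        intro b hb
        simpa using List.mem_takeWhile_imp hb
      have h1 : ((true :: t).foldl pvStep (m, 0)) =
          (t.takeWhile (fun b => b) ++ t.dropWhile (fun b => b)).foldl pvStep (max m 1, 1) := by
        rw [← hsplit]; simp [pvStep]
      have h2 := pv_aux_run (t.takeWhile (fun b => b)) (t.dropWhile (fun b => b))
        (max m 1) 1 hall (le_max_right _ _)
      have hM : max (max m 1) (1 + ((t.takeWhile (fun b => b)).length : Int)) =
          max m (((t.takeWhile (fun b => b)).length : Int) + 1) := by
        rw [max_assoc, max_eq_right (by omega : (1 : Int) ≤ 1 + ((t.takeWhile (fun b => b)).length : Int))]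
        congr 1
        ring
      have hscan : pvScan (true :: t) m =
          pvScan (t.dropWhile (fun b => b)) (max m (((t.takeWhile (fun b => b)).length : Int) + 1)) := by
        rw [pvScan]
        simp only [List.span_eq_takeWhile_dropWhile]
      rw [h1, h2, hM, hscan]
      cases hr : t.dropWhile (fun b => b) with
      | nil => simp [pvScan]
      | cons bb r =>
        have hb : bb = false := pv_dropWhile_head_false t bb r hr
        subst hb
        have h3 : ((false :: r).foldl pvStep
            (max m (((t.takeWhile (fun b => b)).length : Int) + 1), 1 + ((t.takeWhile (fun b => b)).length : Int))) =
            r.foldl pvStep (max m (((t.takeWhile (fun b => b)).length : Int) + 1), 0) := by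
          simp [pvStep]
        have hrlen : r.length ≤ n := by
          have h4 := List.length_dropWhile_le (p := fun b => b) (l := t)
          rw [hr] at h4; simp at h4; omega
        rw [h3, ih r _ hrlen]
        simp [pvScan]

lemma pv_flags_eq (lst : List Int) :
    pvFlags lst = (List.range (lst.length - 1)).map
      (fun k => decide (lst.getD k 0 * lst.getD (k + 1) 0 < 0)) := by
  apply List.ext_getElem
  · simp [pvFlags]
  · intro k h1 h2
    simp [pvFlags] at h1 ⊢
    have hk : k < lst.length - 1 := by omega
    have hk1 : 1 + k < lst.length := by omega
    rw [List.getElem?_eq_getElem (show k < lst.length by omega),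
        List.getElem?_eq_getElem (show k + 1 < lst.length by omega)]
    simp

lemma pv_A_fold_eq (lst : List Int) :
    soluongphantudandau lst = ((pvFlags lst).foldl pvStep (0, 0)).1 := by
  unfold soluongphantudandau
  rw [PySem.List.pyRange_one]
  have hlen : ((lst.length : Int) - 1 - 0).toNat = lst.length - 1 := by omega
  rw [hlen, List.foldl_map]
  have hfun : (fun (st : Int × Int) (k : Nat) =>
      if PySem.List.pyGetD lst ((0 : Int) + k) 0 * PySem.List.pyGetD lst ((0 : Int) + k + 1) 0 < 0 then
        (max st.1 (st.2 + 1), st.2 + 1)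
      else (st.1, 0)) =
      (fun (st : Int × Int) (k : Nat) => pvStep st (decide (lst.getD k 0 * lst.getD (k + 1) 0 < 0))) := by
    funext st k
    have e3 : PySem.List.pyGetD lst ((0 : Int) + (k : Int) + 1) 0 = lst.getD (k + 1) 0 := by
      rw [show ((0 : Int) + (k : Int) + 1) = ((k + 1 : Nat) : Int) by push_cast; ring]
      exact PySem.List.pyGetD_natCast ..
    rw [e3]
    simp [pvStep]
  rw [hfun, ← List.foldl_map, ← pv_flags_eq]

-- ===== VERDICT (by name: the statement is the Claim_ definition above) =====
theorem soluongphantudandau_spec : Claim_equal_soluongphantudandau := by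
  intro lst _
  unfold Spec_soluongphantudandau soluongphantudandau_alt
  rw [pv_A_fold_eq]
  exact pv_scan_eq (pvFlags lst).length (pvFlags lst) 0 le_rfl
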